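-- pv_equiv track=rewrite | github.com/jong42/Software-Testing-Dataset | std/test_selection.py | get_affected_files
-- ===== SOURCE A (Python) =====
-- from typing import Dict, List
--
-- def get_affected_files(filename:str, dependency_graph: Dict) -> List[str]:
--     """
--     Get names of all files that could possibly be affected by a change in a given file, according to a given
--     dependency graph.
--     :param filename: string. name of the file where the change occurred.
--     :param dependency_graph: Dictionary. Graph containing the dependencies between files in a codebase.
--     :return: List of string. A list of names of the files that have dependencies to the changed file. Includes the changed file
--     """
--     dependent_files = []
--
--     def recursive_search(node: str) -> None:
--         dependent_files.append(node)
--         if 'imported_by' in dependency_graph[node].keys():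
--             for name in dependency_graph[node]['imported_by']:
--                 recursive_search(name)
--     recursive_search(filename)
--     return dependent_files
-- ===== SOURCE B (Python) =====
-- def get_affected_files(filename, dependency_graph):
--     dependent_files = []
--     stack = [filename]
--     while stack:
--         node = stack.pop()
--         dependent_files.append(node)
--         node_info = dependency_graph[node]
--         if 'imported_by' in node_info:
--             stack.extend(reversed(node_info['imported_by']))
--     return dependent_files
-- ===== Notes on version B (the rewrite author's own statement) =====
-- stated objective: alternative
-- what changed: Replaces the recursive closure mutating an outer list with an iterative DFS over an explicit stack (children pushed in reverse), producing the identical left-to-right preorder including duplicates.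
import Mathlib
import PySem

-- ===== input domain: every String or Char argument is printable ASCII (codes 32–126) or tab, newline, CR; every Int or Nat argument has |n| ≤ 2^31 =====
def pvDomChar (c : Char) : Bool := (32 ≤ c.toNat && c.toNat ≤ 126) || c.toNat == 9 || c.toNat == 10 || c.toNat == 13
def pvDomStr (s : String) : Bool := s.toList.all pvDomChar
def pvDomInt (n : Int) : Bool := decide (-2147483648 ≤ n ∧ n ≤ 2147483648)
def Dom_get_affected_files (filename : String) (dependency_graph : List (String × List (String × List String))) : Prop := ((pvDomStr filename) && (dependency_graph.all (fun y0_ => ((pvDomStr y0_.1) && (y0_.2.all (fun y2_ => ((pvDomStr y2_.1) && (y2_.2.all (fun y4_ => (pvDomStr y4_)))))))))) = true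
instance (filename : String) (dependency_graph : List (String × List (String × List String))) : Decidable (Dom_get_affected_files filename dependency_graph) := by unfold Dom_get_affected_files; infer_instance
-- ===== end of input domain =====

-- B replaces A's recursive closure by an iterative DFS with an explicit stack (children pushed
-- reversed, so the left-to-right preorder, duplicates included, is identical); objective: alternative.

-- ===== PORT A =====
-- recursive_search: fuel is only a totality guard (under Pre_ the recursion depth is < fuel);
-- the 'none' branch is Python's KeyError (excluded by Pre_).
def recA (g : List (String × List (String × List String))) : Nat → String → List String → List String
  | 0, _, acc => acc
  | f + 1, node, acc =>
    let acc2 := acc ++ [node]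
    match (PySem.Dict.mk g).get? node with
    | none => acc2
    | some info =>
      match (PySem.Dict.mk info).get? "imported_by" with
      | some names => names.foldl (fun a c => recA g f c a) acc2
      | none => acc2

def get_affected_files (filename : String) (dependency_graph : List (String × List (String × List String))) : List String :=
  recA dependency_graph (dependency_graph.length + 1) filename []

-- ===== PORT B =====
-- worst-case iteration count of the stack loop under Pre_ (totality guard for the while loop)
def totalNames (g : List (String × List (String × List String))) : Nat :=
  (g.map (fun p => (p.2.map (fun q => q.2.length)).sum)).sum

-- the Lean list is the Python stack with its top (last element) at the head, so
-- 'stack.pop()' is taking the head and 'stack.extend(reversed(names))' is 'names ++ rest'.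
def loopB (g : List (String × List (String × List String))) : Nat → List String → List String → List String
  | 0, acc, _ => acc
  | _ + 1, acc, [] => acc
  | f + 1, acc, node :: rest =>
    match (PySem.Dict.mk g).get? node with
    | none => acc ++ [node]   -- Python: KeyError after the append (excluded by Pre_)
    | some info =>
      match (PySem.Dict.mk info).get? "imported_by" with
      | some names => loopB g f (acc ++ [node]) (names ++ rest)
      | none => loopB g f (acc ++ [node]) rest

def get_affected_files_alt (filename : String) (dependency_graph : List (String × List (String × List String))) : List String :=
  loopB dependency_graph ((2 + totalNames dependency_graph) ^ (dependency_graph.length + 1)) [] [filename]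

-- ===== PRECONDITION & SPEC =====
-- the 'imported_by' children of a node (empty for a missing node / missing key)
def childrenOf (g : List (String × List (String × List String))) (node : String) : List String :=
  match (PySem.Dict.mk g).get? node with
  | some info => ((PySem.Dict.mk info).get? "imported_by").getD []
  | none => []

-- Bounded edge-reachability of the INPUT graph: the nodes reachable from a by 1..f 'imported_by'
-- edges (a property of the graph, independent of either program's traversal, accumulator or order;
-- f = g.length bounds nothing is lost, since a duplicate-free edge-path has at most g.length nodes).
def dreach (g : List (String × List (String × List String))) : Nat → String → List String
  | 0, _ => []
  | f + 1, a => (childrenOf g a).flatMap (fun c => c :: dreach g f c)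

-- the nodes reachable from filename
def RS (g : List (String × List (String × List String))) (fn : String) : List String :=
  fn :: dreach g g.length fn

-- Pre_: every node reachable from filename is a key of the graph (otherwise Python raises
-- KeyError) and no reachable node lies on a cycle (otherwise the Python recursion diverges).
def Pre_get_affected_files (filename : String) (dependency_graph : List (String × List (String × List String))) : Prop :=
  (∀ x ∈ RS dependency_graph filename, x ∈ dependency_graph.map Prod.fst) ∧
  (∀ x ∈ RS dependency_graph filename, x ∉ dreach dependency_graph dependency_graph.length x)

instance (filename : String) (dependency_graph : List (String × List (String × List String))) : Decidable (Pre_get_affected_files filename dependency_graph) := by unfold Pre_get_affected_files; infer_instance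

def pvWitness_get_affected_files : String × (List (String × List (String × List String))) :=
  ("a", [("a", [("imported_by", ["b", "c"])]), ("b", [("imported_by", ["c"])]), ("c", [])])

def Spec_get_affected_files (filename : String) (dependency_graph : List (String × List (String × List String))) (out : List String) : Prop := out = get_affected_files_alt filename dependency_graph
instance (filename : String) (dependency_graph : List (String × List (String × List String))) (out : List String) : Decidable (Spec_get_affected_files filename dependency_graph out) := by unfold Spec_get_affected_files; infer_instance

-- ===== CLAIM (what is proved, stated in full; the proofs are below) =====
def Claim_equal_get_affected_files : Prop := ∀ (filename : String) (dependency_graph : List (String × List (String × List String))), Dom_get_affected_files filename dependency_graph → Pre_get_affected_files filename dependency_graph → Spec_get_affected_files filename dependency_graph (get_affected_files filename dependency_graph)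

-- ===== LEMMAS AND PROOFS =====

-- x a key of g ⟺ the dict lookup succeeds
lemma keys_get? (g : List (String × List (String × List String))) (x : String)
    (hx : x ∈ g.map Prod.fst) : ∃ info, (PySem.Dict.mk g).get? x = some info := by
  cases h : (PySem.Dict.mk g).get? x with
  | some info => exact ⟨info, rfl⟩
  | none =>
    rw [PySem.Dict.get?_eq_none_iff_not_mem_keys] at h
    simp only [PySem.Dict.keys_mk] at h
    exact absurd (by simpa using hx) h

lemma dreach_succ_eq (g : List (String × List (String × List String))) (f : Nat) (a : String) :
    dreach g (f + 1) a = (childrenOf g a).flatMap (fun c => c :: dreach g f c) := rfl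

lemma mem_dreach_succ (g : List (String × List (String × List String))) (f : Nat)
    (a x : String) : x ∈ dreach g (f + 1) a ↔
      ∃ c ∈ childrenOf g a, x = c ∨ x ∈ dreach g f c := by
  rw [dreach_succ_eq]
  simp only [List.mem_flatMap, List.mem_cons]

lemma dreach_mono (g : List (String × List (String × List String))) :
    ∀ f1 f2 a x, f1 ≤ f2 → x ∈ dreach g f1 a → x ∈ dreach g f2 a := by
  intro f1
  induction f1 with
  | zero => intro f2 a x _ hx; simp [dreach] at hx
  | succ f ih =>
    intro f2 a x hle hx
    obtain ⟨f2', rfl⟩ : ∃ f2', f2 = f2' + 1 := ⟨f2 - 1, by omega⟩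
    rw [mem_dreach_succ] at hx ⊢
    obtain ⟨c, hc, hx⟩ := hx
    refine ⟨c, hc, ?_⟩
    rcases hx with rfl | hx
    · exact Or.inl rfl
    · exact Or.inr (ih f2' c x (by omega) hx)

lemma dreach_child (g : List (String × List (String × List String))) (f : Nat)
    {a c : String} (hc : c ∈ childrenOf g a) : c ∈ dreach g (f + 1) a := by
  rw [mem_dreach_succ]
  exact ⟨c, hc, Or.inl rfl⟩

lemma dreach_snoc (g : List (String × List (String × List String))) :
    ∀ f a b c, b ∈ dreach g f a → c ∈ childrenOf g b → c ∈ dreach g (f + 1) a := by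
  intro f
  induction f with
  | zero => intro a b c hb; simp [dreach] at hb
  | succ f ih =>
    intro a b c hb hc
    rw [mem_dreach_succ] at hb ⊢
    obtain ⟨d, hd, hb⟩ := hb
    refine ⟨d, hd, ?_⟩
    rcases hb with rfl | hb
    · exact Or.inr (dreach_mono g 1 (f + 1) b c (by omega) (dreach_child g 0 hc))
    · exact Or.inr (ih d b c hb hc)

-- along a reversed edge-path, the head is reachable from every later element
lemma head_reach (g : List (String × List (String × List String))) :
    ∀ (l : List String) (node : String),
      List.IsChain (fun a b => a ∈ childrenOf g b) (node :: l) →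
      ∀ x ∈ l, node ∈ dreach g l.length x := by
  intro l
  induction l with
  | nil => intro node _ x hx; simp at hx
  | cons y l2 ih =>
    intro node hch x hx
    rw [List.isChain_cons_cons] at hch
    rcases List.mem_cons.1 hx with rfl | hx
    · exact dreach_mono g 1 (l2.length + 1) x node (by omega) (dreach_child g 0 hch.1)
    · exact dreach_snoc g l2.length x y node (ih y hch.2 x hx) hch.1

lemma nodup_len (g : List (String × List (String × List String))) (p : List String)
    (hn : p.Nodup) (hk : ∀ x ∈ p, x ∈ g.map Prod.fst) : p.length ≤ g.length := by
  have := (hn.subperm hk).length_le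
  simpa using this

-- invariant: node is the endpoint of a duplicate-free reversed edge-path l from fn inside RS
def InvP (g : List (String × List (String × List String))) (fn node : String)
    (l : List String) : Prop :=
  List.IsChain (fun a b => a ∈ childrenOf g b) (node :: l) ∧
  (node :: l).getLast? = some fn ∧
  (node :: l).Nodup ∧
  ∀ x ∈ node :: l, x ∈ RS g fn

lemma invp_len (g : List (String × List (String × List String))) {fn node : String}
    {l : List String}
    (h1 : ∀ x ∈ RS g fn, x ∈ g.map Prod.fst)
    (hI : InvP g fn node l) : (node :: l).length ≤ g.length :=
  nodup_len g _ hI.2.2.1 (fun x hx => h1 x (hI.2.2.2 x hx))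

lemma invp_ext (g : List (String × List (String × List String))) {fn node c : String}
    {l : List String}
    (h1 : ∀ x ∈ RS g fn, x ∈ g.map Prod.fst)
    (h2 : ∀ x ∈ RS g fn, x ∉ dreach g g.length x)
    (hI : InvP g fn node l) (hc : c ∈ childrenOf g node) : InvP g fn c (node :: l) := by
  obtain ⟨hch, hlast, hnd, hrs⟩ := hI
  have hch' : List.IsChain (fun a b => a ∈ childrenOf g b) (c :: node :: l) :=
    List.isChain_cons_cons.2 ⟨hc, hch⟩
  have hlen : (node :: l).length ≤ g.length :=
    invp_len g h1 ⟨hch, hlast, hnd, hrs⟩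
  have hreach : ∀ x ∈ node :: l, c ∈ dreach g (node :: l).length x :=
    head_reach g (node :: l) c hch'
  have hnotmem : c ∉ node :: l := by
    intro hmem
    exact h2 c (hrs c hmem)
      (dreach_mono g (node :: l).length g.length c c hlen (hreach c hmem))
  have hfn : fn ∈ node :: l := List.mem_of_getLast? hlast
  have hcRS : c ∈ RS g fn := by
    have : c ∈ dreach g g.length fn :=
      dreach_mono g (node :: l).length g.length fn c hlen (hreach fn hfn)
    exact List.mem_cons.2 (Or.inr this)
  refine ⟨hch', ?_, List.nodup_cons.2 ⟨hnotmem, hnd⟩, ?_⟩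
  · rw [List.getLast?_cons_cons]; exact hlast
  · intro x hx
    rcases List.mem_cons.1 hx with rfl | hx
    · exact hcRS
    · exact hrs x hx

-- the Python list mutation as an accumulator: recA appends to its accumulator
lemma recA_acc (g : List (String × List (String × List String))) :
    ∀ f node acc, recA g f node acc = acc ++ recA g f node [] := by
  intro f
  induction f with
  | zero => intro node acc; simp [recA]
  | succ f ih =>
    have haux : ∀ (names : List String) (acc1 acc2 : List String),
        names.foldl (fun a c => recA g f c a) (acc1 ++ acc2) =
        acc1 ++ names.foldl (fun a c => recA g f c a) acc2 := by
      intro names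
      induction names with
      | nil => intro acc1 acc2; rfl
      | cons c names ihn =>
        intro acc1 acc2
        simp only [List.foldl_cons]
        rw [ih c (acc1 ++ acc2), ih c acc2, List.append_assoc, ← ihn]
    intro node acc
    simp only [recA]
    cases hgi : (PySem.Dict.mk g).get? node with
    | none => simp
    | some info =>
      cases hni : (PySem.Dict.mk info).get? "imported_by" with
      | none => simp [hni]
      | some names =>
        simp only [hni]
        have h0 : ∀ A : List String, A ++ [node] = A ++ ([] ++ [node]) := by simp
        rw [h0 acc, haux names acc ([] ++ [node])]

lemma recA_unfold (g : List (String × List (String × List String))) (f : Nat)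
    (node : String) (info : List (String × List String))
    (hgi : (PySem.Dict.mk g).get? node = some info) :
    recA g (f + 1) node [] =
      node :: (childrenOf g node).flatMap (fun c => recA g f c []) := by
  simp only [recA, hgi]
  cases hni : (PySem.Dict.mk info).get? "imported_by" with
  | none => simp [childrenOf, hgi, hni]
  | some names =>
    simp only [hni, childrenOf, hgi, Option.getD_some, List.nil_append]
    rw [PySem.List.foldl_congr_mem' names (fun a c => recA g f c a)
      (fun a c => a ++ recA g f c []) [node] (fun c _ a => recA_acc g f c a)]
    rw [PySem.List.foldl_append_eq_flatMap]
    rfl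

-- fuel irrelevance of the recursion, given the path invariant and enough fuel
lemma recA_stable (g : List (String × List (String × List String))) (fn : String)
    (h1 : ∀ x ∈ RS g fn, x ∈ g.map Prod.fst)
    (h2 : ∀ x ∈ RS g fn, x ∉ dreach g g.length x) :
    ∀ f1 f2 node l, InvP g fn node l →
      g.length + 2 ≤ f1 + (node :: l).length →
      g.length + 2 ≤ f2 + (node :: l).length →
      recA g f1 node [] = recA g f2 node [] := by
  intro f1
  induction f1 with
  | zero =>
    intro f2 node l hI hb1 _
    have := invp_len g h1 hI
    omega
  | succ f1 ih =>
    intro f2 node l hI hb1 hb2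
    have hlen := invp_len g h1 hI
    obtain ⟨f2', rfl⟩ : ∃ f2', f2 = f2' + 1 := ⟨f2 - 1, by omega⟩
    have hnode : node ∈ g.map Prod.fst := h1 node (hI.2.2.2 node (List.mem_cons_self ..))
    obtain ⟨info, hgi⟩ := keys_get? g node hnode
    rw [recA_unfold g f1 node info hgi, recA_unfold g f2' node info hgi]
    congr 1
    apply List.flatMap_congr
    intro c hc
    exact ih f2' c (node :: l) (invp_ext g h1 h2 hI hc)
      (by simp at hb1 ⊢; omega) (by simp at hb2 ⊢; omega)

lemma names_le (g : List (String × List (String × List String)))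
    (node : String) (info : List (String × List String)) (names : List String)
    (hgi : (PySem.Dict.mk g).get? node = some info)
    (hni : (PySem.Dict.mk info).get? "imported_by" = some names) :
    names.length ≤ totalNames g := by
  have hmemg : (node, info) ∈ g := by
    simpa using PySem.Dict.mem_items_of_get?_eq_some (PySem.Dict.mk g) hgi
  have hmemi : ("imported_by", names) ∈ info := by
    simpa using PySem.Dict.mem_items_of_get?_eq_some (PySem.Dict.mk info) hni
  have h1 : names.length ≤ (info.map (fun q => q.2.length)).sum :=
    List.single_le_sum (by simp) _ (List.mem_map_of_mem hmemi)
  have h2 : (info.map (fun q => q.2.length)).sum ≤ totalNames g :=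
    List.single_le_sum (by simp) _
      (List.mem_map_of_mem (f := fun p => (p.2.map (fun q => q.2.length)).sum) hmemg)
  exact le_trans h1 h2

-- output-size bound: |recA g f node []| ≤ (2 + totalNames g)^f
lemma recA_len (g : List (String × List (String × List String))) :
    ∀ f node, (recA g f node []).length ≤ (2 + totalNames g) ^ f := by
  intro f
  induction f with
  | zero => intro node; simp [recA]
  | succ f ih =>
    intro node
    have hW1 : 1 ≤ (2 + totalNames g) ^ f := Nat.one_le_pow _ _ (by omega)
    cases hgi : (PySem.Dict.mk g).get? node with
    | none =>
      simp only [recA, hgi, List.nil_append, List.length_cons, List.length_nil]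
      calc 1 ≤ (2 + totalNames g) ^ f := hW1
        _ ≤ (2 + totalNames g) ^ (f + 1) := Nat.pow_le_pow_right (by omega) (by omega)
    | some info =>
      rw [recA_unfold g f node info hgi]
      simp only [List.length_cons, List.length_flatMap]
      have hall : ∀ x ∈ ((childrenOf g node).map fun c => (recA g f c []).length),
          x ≤ (2 + totalNames g) ^ f := by
        intro x hx
        obtain ⟨c, _, rfl⟩ := List.mem_map.1 hx
        exact ih c
      have hsum := List.sum_le_card_nsmul _ _ hall
      simp only [List.length_map, smul_eq_mul] at hsum
      have hcl : (childrenOf g node).length ≤ totalNames g := by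
        cases hni : (PySem.Dict.mk info).get? "imported_by" with
        | none => simp [childrenOf, hgi, hni]
        | some names =>
          simp only [childrenOf, hgi, hni, Option.getD_some]
          exact names_le g node info names hgi hni
      have : (childrenOf g node).length * (2 + totalNames g) ^ f ≤
          totalNames g * (2 + totalNames g) ^ f :=
        Nat.mul_le_mul_right _ hcl
      have hpow : (2 + totalNames g) ^ (f + 1) = (2 + totalNames g) * (2 + totalNames g) ^ f := by
        ring
      rw [hpow]
      nlinarith [hW1, hsum]

-- the stack loop consumes the stack node by node, producing the recursive preorders
lemma bridge (g : List (String × List (String × List String))) (fn : String)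
    (h1 : ∀ x ∈ RS g fn, x ∈ g.map Prod.fst)
    (h2 : ∀ x ∈ RS g fn, x ∉ dreach g g.length x) :
    ∀ F stack acc, (∀ s ∈ stack, ∃ l, InvP g fn s l) →
      (stack.flatMap (fun s => recA g (g.length + 1) s [])).length ≤ F →
      loopB g F acc stack = acc ++ stack.flatMap (fun s => recA g (g.length + 1) s []) := by
  intro F
  induction F with
  | zero =>
    intro stack acc hInv hF
    cases stack with
    | nil => simp [loopB]
    | cons node rest =>
      exfalso
      obtain ⟨l, hI⟩ := hInv node (List.mem_cons_self ..)
      obtain ⟨info, hgi⟩ := keys_get? g node (h1 node (hI.2.2.2 node (List.mem_cons_self ..)))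
      rw [List.flatMap_cons, recA_unfold g g.length node info hgi] at hF
      simp at hF
  | succ F ih =>
    intro stack acc hInv hF
    cases stack with
    | nil => simp [loopB]
    | cons node rest =>
      obtain ⟨l, hI⟩ := hInv node (List.mem_cons_self ..)
      obtain ⟨info, hgi⟩ := keys_get? g node (h1 node (hI.2.2.2 node (List.mem_cons_self ..)))
      -- the expansion of node's preorder at full fuel
      have hexp : recA g (g.length + 1) node [] =
          node :: (childrenOf g node).flatMap (fun c => recA g (g.length + 1) c []) := by
        rw [recA_unfold g g.length node info hgi]
        congr 1
        apply List.flatMap_congr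
        intro c hc
        have hlen := invp_len g h1 hI
        exact recA_stable g fn h1 h2 g.length (g.length + 1) c (node :: l)
          (invp_ext g h1 h2 hI hc)
          (by simp only [List.length_cons] at hlen ⊢; omega)
          (by simp only [List.length_cons] at hlen ⊢; omega)
      have hInv' : ∀ s ∈ childrenOf g node ++ rest, ∃ l', InvP g fn s l' := by
        intro s hs
        rcases List.mem_append.1 hs with hs | hs
        · exact ⟨node :: l, invp_ext g h1 h2 hI hs⟩
        · exact hInv s (List.mem_cons_of_mem _ hs)
      have hF' : ((childrenOf g node ++ rest).flatMap
          (fun s => recA g (g.length + 1) s [])).length ≤ F := by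
        rw [List.flatMap_cons, hexp] at hF
        simp only [List.flatMap_append, List.length_append] at hF ⊢
        simp only [List.length_cons] at hF
        omega
      have hrec := ih (childrenOf g node ++ rest) (acc ++ [node]) hInv' hF'
      cases hni : (PySem.Dict.mk info).get? "imported_by" with
      | some names =>
        have hch : childrenOf g node = names := by simp [childrenOf, hgi, hni]
        simp only [loopB, hgi, hni]
        rw [← hch, hrec, List.flatMap_cons, hexp]
        simp [List.flatMap_append]
      | none =>
        have hch : childrenOf g node = [] := by simp [childrenOf, hgi, hni]
        simp only [loopB, hgi, hni]
        rw [hch] at hrec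
        simp only [List.nil_append] at hrec
        rw [hrec, List.flatMap_cons, hexp, hch]
        simp

-- ===== VERDICT (by name: the statement is the Claim_ definition above) =====
theorem get_affected_files_spec : Claim_equal_get_affected_files := by
  intro fn g _hdom hpre
  obtain ⟨h1, h2⟩ := hpre
  unfold Spec_get_affected_files get_affected_files get_affected_files_alt
  have hIfn : InvP g fn fn [] := by
    refine ⟨List.IsChain.singleton fn, rfl, List.nodup_singleton fn, ?_⟩
    intro x hx
    rcases List.mem_cons.1 hx with rfl | hx
    · exact List.mem_cons_self ..
    · simp at hx
  have hF : ([fn].flatMap (fun s => recA g (g.length + 1) s [])).length ≤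
      (2 + totalNames g) ^ (g.length + 1) := by
    simp only [List.flatMap_cons, List.flatMap_nil, List.append_nil]
    exact recA_len g (g.length + 1) fn
  have := bridge g fn h1 h2 ((2 + totalNames g) ^ (g.length + 1)) [fn] []
    (by intro s hs; simp at hs; subst hs; exact ⟨[], hIfn⟩) hF
  rw [this]
  simp
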